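-- pv_equiv track=rewrite | github.com/quetzaluz/codesnippets | python/leetcode/isomorphic-strings.py | encodeIsomorphic
-- ===== SOURCE A (Python) =====
-- def encodeIsomorphic(s):
--     sH = {}
--     sR = ''
--     sC = 0
--     for c in s:
--         if c in sH:
--             sR += str(sH[c])
--         else:
--             sH[c] = sC
--             sR += str(sH[c])
--             sC += 1
--     return sR
-- ===== SOURCE B (Python) =====
-- def encodeIsomorphic(s):
--     # Label of a character = number of distinct characters strictly before its
--     # first occurrence: a closed form per character (no running counter),
--     # computed once per distinct character, then emitted in a second pass.
--     label = {c: len(set(s[:s.find(c)])) for c in dict.fromkeys(s)}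
--     return ''.join(str(label[c]) for c in s)
-- ===== Notes on version B (the rewrite author's own statement) =====
-- stated objective: alternative
-- what changed: Drops A's incremental dict/counter/accumulator loop: each distinct character's label is a closed form, len(set(s[:s.find(c)])) = number of distinct characters before its first occurrence, computed in a dict comprehension over dict.fromkeys(s), then the labels are emitted by a join pass.
import Mathlib
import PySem

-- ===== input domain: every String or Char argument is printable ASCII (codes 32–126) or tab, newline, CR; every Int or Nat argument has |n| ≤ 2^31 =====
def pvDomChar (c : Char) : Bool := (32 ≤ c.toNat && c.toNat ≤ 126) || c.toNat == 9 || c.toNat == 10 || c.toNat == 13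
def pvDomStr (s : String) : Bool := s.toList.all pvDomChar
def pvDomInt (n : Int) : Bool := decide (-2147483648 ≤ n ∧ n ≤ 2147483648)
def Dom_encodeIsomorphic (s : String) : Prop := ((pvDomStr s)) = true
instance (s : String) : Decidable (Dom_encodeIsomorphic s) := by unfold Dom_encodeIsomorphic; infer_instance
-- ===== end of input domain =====

-- B drops A's incremental counter/accumulator state: each distinct character's label is a closed
-- form, len(set(s[:s.find(c)])) = distinct characters before its first occurrence, then a join pass.

-- ===== PORT A =====
-- A's for-loop over s with state (sH, sR, sC); the growing Python string sR is ported as a Char list,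
-- turned into a String at the end.
def encodeIsomorphicLoop (cs : List Char) (sH : PySem.Dict Char Int) (sR : List Char) (sC : Int) : List Char :=
  match cs with
  | [] => sR
  | c :: rest =>
    if sH.contains c then
      encodeIsomorphicLoop rest sH (sR ++ PySem.Int.toChars (sH.getD c 0)) sC
    else
      encodeIsomorphicLoop rest (sH.insert c sC) (sR ++ PySem.Int.toChars ((sH.insert c sC).getD c 0)) (sC + 1)

def encodeIsomorphic (s : String) : String :=
  String.ofList (encodeIsomorphicLoop s.toList PySem.Dict.empty [] 0)

-- ===== PORT B =====
-- label = {c: len(set(s[:s.find(c)])) for c in dict.fromkeys(s)}; ''.join(str(label[c]) for c in s)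
-- (for c drawn from s, s.find(c) is never -1, so the slice bound is the first-occurrence index;
--  label[c] never raises: every c of s is a key; ported as getD with an unused default)
def encodeIsomorphic_alt (s : String) : String :=
  let label : PySem.Dict Char Int :=
    PySem.Dict.ofList ((PySem.List.dedup s.toList).map (fun c =>
      (c, (((PySem.Set.ofList
        (PySem.List.slice s.toList none (some (PySem.Chars.find s.toList [c])))).length : Nat) : Int))))
  PySem.Str.join "" (s.toList.map (fun c => PySem.Int.toStr (label.getD c 0)))

-- ===== PRECONDITION & SPEC =====
def Spec_encodeIsomorphic (s : String) (out : String) : Prop := out = encodeIsomorphic_alt s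
instance (s : String) (out : String) : Decidable (Spec_encodeIsomorphic s out) := by unfold Spec_encodeIsomorphic; infer_instance

-- ===== CLAIM (what is proved, stated in full; the proofs are below) =====
def Claim_equal_encodeIsomorphic : Prop := ∀ (s : String), Dom_encodeIsomorphic s → Spec_encodeIsomorphic s (encodeIsomorphic s)

-- ===== LEMMAS AND PROOFS =====

-- dedup (= PySem.Set.ofList) grows at the end: what is built is an extension of any earlier stage
theorem pvFoldlAddPrefix {α : Type} [BEq α] (t : List α) (s : PySem.Set α) :
    s <+: List.foldl PySem.Set.add s t := by
  induction t generalizing s with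
  | nil => exact List.prefix_refl s
  | cons x t ih =>
    refine List.IsPrefix.trans ?_ (ih (PySem.Set.add s x))
    unfold PySem.Set.add
    split
    · exact List.prefix_refl s
    · exact ⟨[x], rfl⟩

theorem pvDedupAppendPrefix (p t : List Char) :
    PySem.List.dedup p <+: PySem.List.dedup (p ++ t) := by
  unfold PySem.List.dedup PySem.Set.ofList
  rw [List.foldl_append]
  exact pvFoldlAddPrefix t _

-- idxOf of an already-seen character is unchanged by processing more input
theorem pvIdxOfDedupAppend (p t : List Char) (c : Char) (hc : c ∈ p) :
    (PySem.List.dedup (p ++ t)).idxOf c = (PySem.List.dedup p).idxOf c := by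
  obtain ⟨u, hu⟩ := pvDedupAppendPrefix p t
  rw [← hu, List.idxOf_append_of_mem ((PySem.List.mem_dedup p c).2 hc)]

theorem pvOfListAppendFoldl (p l : List Char) :
    PySem.Set.ofList (p ++ l) = List.foldl PySem.Set.add (PySem.Set.ofList p) l := by
  unfold PySem.Set.ofList
  rw [List.foldl_append]

theorem pvContainsOfList (p : List Char) (c : Char) :
    (PySem.Set.ofList p).contains c = decide (c ∈ p) := by
  by_cases hc : c ∈ p
  · simp [PySem.Set.mem_ofList, hc]
  · simp [PySem.Set.mem_ofList, hc]

theorem pvDedupAppendConsMem (p : List Char) (c : Char) (t : List Char) (hc : c ∈ p) :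
    PySem.List.dedup (p ++ c :: t) = PySem.List.dedup (p ++ t) := by
  unfold PySem.List.dedup
  rw [pvOfListAppendFoldl, pvOfListAppendFoldl, List.foldl_cons]
  have hadd : PySem.Set.add (PySem.Set.ofList p) c = PySem.Set.ofList p := by
    unfold PySem.Set.add
    rw [pvContainsOfList]
    simp [hc]
  rw [hadd]

theorem pvDedupAppendConsNew (p : List Char) (c : Char) (t : List Char) (hc : c ∉ p) :
    PySem.List.dedup (p ++ c :: t)
      = List.foldl PySem.Set.add (PySem.List.dedup p ++ [c]) t := by
  unfold PySem.List.dedup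
  rw [pvOfListAppendFoldl, List.foldl_cons]
  have hadd : PySem.Set.add (PySem.Set.ofList p) c = PySem.Set.ofList p ++ [c] := by
    unfold PySem.Set.add
    rw [pvContainsOfList]
    simp [hc]
  rw [hadd]

theorem pvDedupSnoc (p : List Char) (c : Char) (hc : c ∉ p) :
    PySem.List.dedup (p ++ [c]) = PySem.List.dedup p ++ [c] := by
  simpa using pvDedupAppendConsNew p c [] hc

-- a fresh character is labelled with the current distinct-count, which is its final idxOf
theorem pvIdxOfNew (p t : List Char) (c : Char) (hc : c ∉ p) :
    (PySem.List.dedup (p ++ c :: t)).idxOf c = (PySem.List.dedup p).length := by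
  rw [pvDedupAppendConsNew p c t hc]
  obtain ⟨u, hu⟩ := pvFoldlAddPrefix t (PySem.List.dedup p ++ [c])
  rw [← hu, List.idxOf_append_of_mem (by simp)]
  rw [List.idxOf_append]
  simp [hc]

-- A's loop invariant: sH maps each seen character to its first-appearance rank, sC counts distinct seen
theorem pvALoopEq : ∀ (rest p : List Char) (d : PySem.Dict Char Int),
    (∀ c, d.get? c = if c ∈ p then some (((PySem.List.dedup p).idxOf c : Nat) : Int) else none) →
    ∀ r, encodeIsomorphicLoop rest d r ((PySem.List.dedup p).length : Int)
      = r ++ (rest.map (fun c =>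
          PySem.Int.toChars (((PySem.List.dedup (p ++ rest)).idxOf c : Nat) : Int))).flatten := by
  intro rest
  induction rest with
  | nil => intro p d _ r; simp [encodeIsomorphicLoop]
  | cons c rest ih =>
    intro p d hget r
    by_cases hc : c ∈ p
    · have hcont : d.contains c = true := by
        rw [PySem.Dict.contains_eq_isSome_get?, hget c]; simp [hc]
      have hgd : d.getD c 0 = (((PySem.List.dedup p).idxOf c : Nat) : Int) := by
        rw [PySem.Dict.getD_eq_get?_getD, hget c]; simp [hc]
      rw [encodeIsomorphicLoop, if_pos hcont, hgd, ih p d hget, List.map_cons, List.flatten_cons,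
        pvDedupAppendConsMem p c rest hc, pvIdxOfDedupAppend p rest c hc, List.append_assoc]
    · have hcont : d.contains c = false := by
        rw [PySem.Dict.contains_eq_isSome_get?, hget c]; simp [hc]
      set n : Int := ((PySem.List.dedup p).length : Int) with hn
      have hgd : (d.insert c n).getD c 0 = n := by
        rw [PySem.Dict.getD_eq_get?_getD, PySem.Dict.get?_insert_self]; rfl
      have hget' : ∀ c', (d.insert c n).get? c'
          = if c' ∈ p ++ [c] then some (((PySem.List.dedup (p ++ [c])).idxOf c' : Nat) : Int)
            else none := by
        intro c'
        rw [PySem.Dict.get?_insert]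
        by_cases hcc : c' = c
        · subst hcc
          rw [if_pos rfl, if_pos (by simp)]
          rw [pvDedupSnoc p c' hc]
          rw [List.idxOf_append]
          simp [hc, hn]
        · rw [if_neg hcc, hget c']
          by_cases hcp : c' ∈ p
          · rw [if_pos hcp, if_pos (by simp [hcp])]
            rw [pvDedupSnoc p c hc, List.idxOf_append_of_mem ((PySem.List.mem_dedup p c').2 hcp)]
          · rw [if_neg hcp, if_neg (by simp [hcp, hcc])]
      have hlen : n + 1 = ((PySem.List.dedup (p ++ [c])).length : Int) := by
        rw [pvDedupSnoc p c hc]; simp [hn]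
      have hfull : (p ++ [c]) ++ rest = p ++ c :: rest := by simp
      have hhead : (PySem.List.dedup (p ++ c :: rest)).idxOf c = (PySem.List.dedup p).length :=
        pvIdxOfNew p rest c hc
      rw [encodeIsomorphicLoop, if_neg (by simp [hcont]), hgd, hlen, ih (p ++ [c]) _ hget',
        hfull, List.map_cons, List.flatten_cons, hhead, ← List.append_assoc, hn]

theorem pvAChars (s : String) :
    encodeIsomorphic s = String.ofList ((s.toList.map (fun c =>
      PySem.Int.toChars (((PySem.List.dedup s.toList).idxOf c : Nat) : Int))).flatten) := by
  unfold encodeIsomorphic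
  have h0 : ∀ c : Char, (PySem.Dict.empty : PySem.Dict Char Int).get? c
      = if c ∈ ([] : List Char) then some (((PySem.List.dedup ([] : List Char)).idxOf c : Nat) : Int)
        else none := by
    intro c; simp [PySem.Dict.get?_empty]
  have := pvALoopEq s.toList [] PySem.Dict.empty h0 []
  simp only [List.nil_append] at this
  have hz : ((PySem.List.dedup ([] : List Char)).length : Int) = 0 := by decide
  rw [hz] at this
  rw [this]

-- minimality facts about idxOf, via List.lt_findIdx_iff
theorem pvIdxOfLe (cs : List Char) (c : Char) (i : Nat) (hi : i < cs.length) (h : cs[i] = c) :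
    cs.idxOf c ≤ i := by
  by_contra hlt
  rw [not_le] at hlt
  obtain ⟨_, hall⟩ := (List.lt_findIdx_iff cs (· == c) i).1 hlt
  have := hall i le_rfl
  simp [h] at this

theorem pvIdxOfMin (cs : List Char) (c : Char) (i : Nat) (hic : i < cs.idxOf c)
    (hi : i < cs.length) : cs[i] ≠ c := by
  obtain ⟨_, hall⟩ := (List.lt_findIdx_iff cs (· == c) i).1 hic
  have := hall i le_rfl
  simpa using this

-- [c] is a prefix of a drop exactly where the character sits at that index
theorem pvSingletonPrefixDrop (cs : List Char) (c : Char) (i : Nat) :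
    [c] <+: cs.drop i ↔ cs[i]? = some c := by
  constructor
  · rintro ⟨t, ht⟩
    have : (cs.drop i)[0]? = some c := by rw [← ht]; rfl
    rwa [List.getElem?_drop, Nat.add_zero] at this
  · intro h
    obtain ⟨hi, hv⟩ := List.getElem?_eq_some_iff.1 h
    exact ⟨cs.drop (i + 1), by rw [← List.getElem_cons_drop hi, hv]; rfl⟩

-- s.find(c) for a character of s is its first-occurrence index
theorem pvFindSingleton (cs : List Char) (c : Char) (hc : c ∈ cs) :
    PySem.Chars.find cs [c] = ((cs.idxOf c : Nat) : Int) := by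
  have hinf : [c] <:+: cs := by
    obtain ⟨p, t, hpt⟩ := List.append_of_mem hc
    exact ⟨p, t, by simp [hpt]⟩
  have hnn : 0 ≤ PySem.Chars.find cs [c] := (PySem.Chars.find_nonneg_iff cs [c]).2 hinf
  obtain ⟨hpre, hmin⟩ := PySem.Chars.find_spec hnn
  set n : Nat := (PySem.Chars.find cs [c]).toNat with hn
  obtain ⟨hnlt, hnv⟩ := List.getElem?_eq_some_iff.1 ((pvSingletonPrefixDrop cs c n).1 hpre)
  have h1 : cs.idxOf c ≤ n := pvIdxOfLe cs c n hnlt hnv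
  have h2 : ¬ cs.idxOf c < n := by
    intro hlt
    exact hmin _ hlt ((pvSingletonPrefixDrop cs c _).2 (by
      rw [List.getElem?_eq_getElem (List.idxOf_lt_length_of_mem hc)]
      simp [List.getElem_idxOf]))
  have hidx : cs.idxOf c = n := by omega
  rw [hidx]
  omega

-- the label of c is the number of distinct characters before its first occurrence
theorem pvPrefixLabel (cs : List Char) (c : Char) (hc : c ∈ cs) :
    (PySem.Set.ofList (cs.take (cs.idxOf c))).length = (PySem.List.dedup cs).idxOf c := by
  set k : Nat := cs.idxOf c with hk
  have hklt : k < cs.length := List.idxOf_lt_length_of_mem hc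
  have hck : cs[k] = c := List.getElem_idxOf hklt
  have hdrop : cs.drop k = c :: cs.drop (k + 1) := by
    rw [← List.getElem_cons_drop hklt, hck]
  have hdec : cs = cs.take k ++ c :: cs.drop (k + 1) := by
    rw [← hdrop, List.take_append_drop]
  have hnot : c ∉ cs.take k := by
    intro hmem
    obtain ⟨i, hi, hv⟩ := List.getElem_of_mem hmem
    have hik : i < k := by have := List.length_take_le k cs; omega
    have hicl : i < cs.length := by omega
    have : cs[i] = c := by rw [← hv, List.getElem_take]
    exact pvIdxOfMin cs c i (hk ▸ hik) hicl this
  have hnew := pvIdxOfNew (cs.take k) (cs.drop (k + 1)) c hnot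
  rw [← hdec] at hnew
  rw [hnew]
  simp [PySem.List.dedup]

theorem pvJoinNil (ls : List (List Char)) : PySem.Chars.join [] ls = ls.flatten := by
  induction ls with
  | nil => rfl
  | cons x ls ih =>
    cases ls with
    | nil => simp [PySem.Chars.join, List.intercalate]
    | cons y ls =>
      rw [PySem.Chars.join_cons_cons, ih, List.flatten_cons]
      simp

-- looking up c in the comprehension-built dict yields its closed-form label
theorem pvBLookup (cs : List Char) (c : Char) (hc : c ∈ cs) :
    (PySem.Dict.ofList ((PySem.List.dedup cs).map (fun c =>
        (c, (((PySem.Set.ofList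
          (PySem.List.slice cs none (some (PySem.Chars.find cs [c])))).length : Nat) : Int))))).getD c 0
      = (((PySem.Set.ofList
          (PySem.List.slice cs none (some (PySem.Chars.find cs [c])))).length : Nat) : Int) := by
  set f : Char → Int := fun c =>
    (((PySem.Set.ofList
      (PySem.List.slice cs none (some (PySem.Chars.find cs [c])))).length : Nat) : Int) with hf
  have hkeys : ((PySem.List.dedup cs).map (fun c => (c, f c))).map (·.1) = PySem.List.dedup cs := by
    rw [List.map_map]
    exact List.map_id' (PySem.List.dedup cs)
  have hitems : (PySem.Dict.ofList ((PySem.List.dedup cs).map (fun c => (c, f c)))).items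
      = (PySem.List.dedup cs).map (fun c => (c, f c)) := by
    unfold PySem.Dict.ofList PySem.Dict.update
    have := PySem.Dict.items_foldl_insert_fresh
      ((PySem.List.dedup cs).map (fun c => (c, f c))) (·.1) (·.2) PySem.Dict.empty
      (fun a _ => PySem.Dict.contains_empty a.1)
      (by rw [hkeys]; exact PySem.List.nodup_dedup cs)
    simpa using this
  have hmem : (c, f c) ∈ (PySem.List.dedup cs).map (fun c => (c, f c)) :=
    List.mem_map_of_mem ((PySem.List.mem_dedup cs c).2 hc)
  exact PySem.Dict.getD_of_mem_items _ (by rw [hitems]; exact hmem)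
    (PySem.Dict.nodup_keys_ofList _) 0

theorem pvBChars (s : String) :
    encodeIsomorphic_alt s = String.ofList ((s.toList.map (fun c =>
      PySem.Int.toChars (((PySem.List.dedup s.toList).idxOf c : Nat) : Int))).flatten) := by
  unfold encodeIsomorphic_alt
  rw [PySem.Str.join]
  congr 1
  have hsep : ("" : String).toList = [] := rfl
  rw [hsep, pvJoinNil, List.map_map]
  congr 1
  apply List.map_congr_left
  intro c hc
  simp only [Function.comp]
  rw [PySem.Int.toList_toStr]
  congr 1
  rw [pvBLookup s.toList c hc]
  congr 1
  rw [pvFindSingleton s.toList c hc, PySem.List.slice_to_natCast]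
  exact pvPrefixLabel s.toList c hc

-- ===== VERDICT (by name: the statement is the Claim_ definition above) =====
theorem encodeIsomorphic_spec : Claim_equal_encodeIsomorphic := by
  intro s _
  unfold Spec_encodeIsomorphic
  rw [pvAChars, pvBChars]
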